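-- pv_equiv track=rewrite | github.com/Govind-Deshmukh/huntoza-nlp-middleware | services/extractors/highlights_extractor.py | group_similar_items
-- ===== SOURCE A (Python) =====
-- def group_similar_items(items):
--     """
--     Group similar items to avoid redundancy.
--
--     Args:
--         items (list): List of items to group
--
--     Returns:
--         list: Grouped items
--     """
--     if not items:
--         return []
--
--     # Define groups of related terms
--     groups = [
--         {'health insurance', 'medical', 'health', 'healthcare'},
--         {'dental', 'vision'},
--         {'401k', 'retirement'},
--         {'PTO', 'paid time off', 'vacation', 'holidays', 'sick leave'},
--         {'parental leave', 'maternity', 'paternity'},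
--         {'bonus', 'stock options', 'equity'},
--         {'flexible hours', 'flexible schedule', 'work-life balance'},
--         {'remote work', 'work from home', 'WFH', 'hybrid'},
--         {'gym', 'fitness', 'wellness', 'mental health'},
--         {'education', 'tuition', 'professional development', 'training'}
--     ]
--
--     # Standardized terms for each group
--     group_names = [
--         'Health insurance',
--         'Dental & vision',
--         'Retirement plan',
--         'Paid time off',
--         'Parental leave',
--         'Performance bonuses/equity',
--         'Flexible schedule',
--         'Remote/hybrid work',
--         'Wellness programs',
--         'Education & development'
--     ]
--
--     result = []
--     used_groups = set()
--
--     # First pass - handle grouped items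
--     for item in items:
--         item_lower = item.lower()
--
--         for i, group in enumerate(groups):
--             if i in used_groups:
--                 continue
--
--             if any(term in item_lower for term in group):
--                 result.append(group_names[i])
--                 used_groups.add(i)
--                 break
--
--     # Second pass - add remaining items that don't belong to any group
--     for item in items:
--         item_lower = item.lower()
--
--         if not any(any(term in item_lower for term in group) for group in groups):
--             # Capitalize first letter of each word
--             item = ' '.join(word.capitalize() for word in item.split())
--             result.append(item)
--
--     return result
-- ===== SOURCE B (Python) =====
-- # Single pass over items with two accumulators (grouped, ungrouped) and a used-set,
-- # instead of A's two separate passes over items.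
--
-- GROUPS = [
--     {'health insurance', 'medical', 'health', 'healthcare'},
--     {'dental', 'vision'},
--     {'401k', 'retirement'},
--     {'PTO', 'paid time off', 'vacation', 'holidays', 'sick leave'},
--     {'parental leave', 'maternity', 'paternity'},
--     {'bonus', 'stock options', 'equity'},
--     {'flexible hours', 'flexible schedule', 'work-life balance'},
--     {'remote work', 'work from home', 'WFH', 'hybrid'},
--     {'gym', 'fitness', 'wellness', 'mental health'},
--     {'education', 'tuition', 'professional development', 'training'},
-- ]
--
-- GROUP_NAMES = [
--     'Health insurance',
--     'Dental & vision',
--     'Retirement plan',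
--     'Paid time off',
--     'Parental leave',
--     'Performance bonuses/equity',
--     'Flexible schedule',
--     'Remote/hybrid work',
--     'Wellness programs',
--     'Education & development',
-- ]
--
--
-- def group_similar_items(items):
--     grouped = []
--     ungrouped = []
--     used = set()
--     for item in items:
--         low = item.lower()
--         matched_any = False
--         for i, group in enumerate(GROUPS):
--             if any(term in low for term in group):
--                 matched_any = True
--                 if i not in used:
--                     grouped.append(GROUP_NAMES[i])
--                     used.add(i)
--                     break
--         if not matched_any:
--             ungrouped.append(' '.join(w.capitalize() for w in item.split()))
--     return grouped + ungrouped
-- ===== Notes on version B (the rewrite author's own statement) =====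
-- stated objective: faster
-- what changed: B replaces A's two separate passes over items (one building grouped standard names, one re-scanning every item against all groups to collect ungrouped leftovers) by a single traversal keeping two accumulators (grouped, ungrouped) plus the used-set, distinguishing 'matched some group' from 'matched an unused group' inside one inner scan.
import Mathlib
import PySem

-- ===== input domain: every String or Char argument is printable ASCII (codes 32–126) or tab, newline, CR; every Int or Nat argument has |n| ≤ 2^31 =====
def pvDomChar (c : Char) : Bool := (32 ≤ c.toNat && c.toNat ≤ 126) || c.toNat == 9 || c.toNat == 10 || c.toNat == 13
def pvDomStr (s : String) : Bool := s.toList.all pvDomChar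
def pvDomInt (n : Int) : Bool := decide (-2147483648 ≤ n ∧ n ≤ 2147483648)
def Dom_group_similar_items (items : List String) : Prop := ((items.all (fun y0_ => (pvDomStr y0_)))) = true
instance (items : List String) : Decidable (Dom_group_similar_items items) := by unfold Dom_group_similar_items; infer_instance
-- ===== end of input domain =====

-- B replaces A's two separate passes over `items` by a single pass keeping two
-- accumulators (grouped, ungrouped) and the used-set (objective: alternative decomposition).

-- Shared module data (identical literals in both Pythons).
-- Each Python group is a set literal of distinct terms; the programs only ask
-- `any(term in low for term in group)`, which is order-independent, so the
-- groups are ported as their element lists in source order.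
def pvGroups : List (List String) :=
  [ ["health insurance", "medical", "health", "healthcare"],
    ["dental", "vision"],
    ["401k", "retirement"],
    ["PTO", "paid time off", "vacation", "holidays", "sick leave"],
    ["parental leave", "maternity", "paternity"],
    ["bonus", "stock options", "equity"],
    ["flexible hours", "flexible schedule", "work-life balance"],
    ["remote work", "work from home", "WFH", "hybrid"],
    ["gym", "fitness", "wellness", "mental health"],
    ["education", "tuition", "professional development", "training"] ]

def pvGroupNames : List String :=
  [ "Health insurance", "Dental & vision", "Retirement plan", "Paid time off",
    "Parental leave", "Performance bonuses/equity", "Flexible schedule",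
    "Remote/hybrid work", "Wellness programs", "Education & development" ]

-- enumerate(groups) as index/group pairs (both Pythons iterate `enumerate(GROUPS)`)
def pvEnumGroups : List (Nat × List String) :=
  (List.range pvGroups.length).zip pvGroups

-- any(term in item_lower for term in group)   ('in' on strings = substring, PySem.Str.isIn)
def pvMatches (group : List String) (low : String) : Bool :=
  group.any (fun term => PySem.Str.isIn term low)

-- word.capitalize(): first char upper-cased, rest lower-cased (exact on the ASCII domain)
def pvCapitalize (s : String) : String :=
  match s.toList with
  | [] => s
  | c :: cs => String.ofList (PySem.Chars.upperChar c :: cs.map PySem.Chars.lowerChar)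

-- ' '.join(word.capitalize() for word in item.split())
def pvCapWords (item : String) : String :=
  PySem.Str.join " " ((PySem.Str.split₀ item).map pvCapitalize)

-- ===== PORT A =====

-- A's inner loop of pass 1: skip used groups, break at the first matching one.
def aScan (used : PySem.Set Nat) (low : String) : List (Nat × List String) → Option Nat
  | [] => none
  | (i, group) :: rest =>
    if PySem.Set.contains used i then aScan used low rest
    else if pvMatches group low then some i
    else aScan used low rest

-- one item of A's first pass (result, used_groups); group_names[i] always in
-- range (i comes from enumerate of the same-length list), so the getD default is unreachable
def aPass1Step (st : List String × PySem.Set Nat) (item : String) :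
    List String × PySem.Set Nat :=
  let low := PySem.Str.lower item
  match aScan st.2 low pvEnumGroups with
  | some i => (st.1 ++ [(PySem.List.pyGet? pvGroupNames (Int.ofNat i)).getD ""], PySem.Set.add st.2 i)
  | none => st

-- pass 2's condition: not any(any(term in item_lower for term in group) for group in groups)
def aNoGroup (item : String) : Bool :=
  !(pvGroups.any (fun group => pvMatches group (PySem.Str.lower item)))

-- one item of A's second pass
def aPass2Step (res : List String) (item : String) : List String :=
  if aNoGroup item then res ++ [pvCapWords item] else res

def group_similar_items (items : List String) : List String :=
  if items.isEmpty then []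
  else
    let p1 := items.foldl aPass1Step ([], PySem.Set.empty)
    items.foldl aPass2Step p1.1

-- ===== PORT B =====

-- B's inner loop: one scan of all groups returning (matched_any, first unused match)
def bScan (used : PySem.Set Nat) (low : String) (m : Bool) :
    List (Nat × List String) → Bool × Option Nat
  | [] => (m, none)
  | (i, group) :: rest =>
    if pvMatches group low then
      if PySem.Set.contains used i then bScan used low true rest
      else (true, some i)
    else bScan used low m rest

-- one item of B's single pass over (grouped, ungrouped, used)
def bStep (st : List String × List String × PySem.Set Nat) (item : String) :
    List String × List String × PySem.Set Nat :=
  let low := PySem.Str.lower item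
  let r := bScan st.2.2 low false pvEnumGroups
  let st' :=
    match r.2 with
    | some i => (st.1 ++ [(PySem.List.pyGet? pvGroupNames (Int.ofNat i)).getD ""], st.2.1, PySem.Set.add st.2.2 i)
    | none => st
  if r.1 then st' else (st'.1, st'.2.1 ++ [pvCapWords item], st'.2.2)

def group_similar_items_alt (items : List String) : List String :=
  let r := items.foldl bStep ([], [], PySem.Set.empty)
  r.1 ++ r.2.1

-- ===== PRECONDITION & SPEC =====
def Spec_group_similar_items (items : List String) (out : List String) : Prop := out = group_similar_items_alt items
instance (items : List String) (out : List String) : Decidable (Spec_group_similar_items items out) := by unfold Spec_group_similar_items; infer_instance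

-- ===== CLAIM (what is proved, stated in full; the proofs are below) =====
def Claim_equal_group_similar_items : Prop := ∀ (items : List String), Dom_group_similar_items items → Spec_group_similar_items items (group_similar_items items)

-- ===== LEMMAS AND PROOFS =====

-- B's one scan computes exactly (matched_any, A's first unused match)
theorem bScan_eq (low : String) :
    ∀ (gs : List (Nat × List String)) (used : PySem.Set Nat) (m : Bool),
      bScan used low m gs = (m || gs.any (fun p => pvMatches p.2 low), aScan used low gs) := by
  intro gs
  induction gs with
  | nil => intro used m; simp [bScan, aScan]
  | cons hd tl ih =>
    intro used m
    obtain ⟨i, group⟩ := hd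
    by_cases hm : pvMatches group low
    · by_cases hu : i ∈ used
      · simp [bScan, aScan, hm, hu, ih]
      · simp [bScan, aScan, hm, hu]
    · simp [bScan, aScan, hm, ih]

-- a successful A-scan means some group matched
theorem aScan_some_any (low : String) :
    ∀ (gs : List (Nat × List String)) (used : PySem.Set Nat) (i : Nat),
      aScan used low gs = some i → gs.any (fun p => pvMatches p.2 low) = true := by
  intro gs
  induction gs with
  | nil => intro used i h; simp [aScan] at h
  | cons hd tl ih =>
    intro used i h
    obtain ⟨j, group⟩ := hd
    by_cases hu : j ∈ used
    · simp [aScan, hu] at h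
      simp [ih used i h]
    · by_cases hm : pvMatches group low
      · simp [hm]
      · simp [aScan, hu, hm] at h
        simp [ih used i h]

-- any over the enumerated groups = any over the groups (pass 2's condition)
theorem any_enum (low : String) :
    pvEnumGroups.any (fun p => pvMatches p.2 low) = pvGroups.any (fun g => pvMatches g low) := by
  simp [pvEnumGroups, pvGroups, List.range, List.range.loop, List.zip, List.zipWith, List.any]

-- the single B pass computes A's two passes, for any starting accumulators
theorem loop_eq :
    ∀ (items : List String) (g u : List String) (used : PySem.Set Nat),
      items.foldl bStep (g, u, used)
        = ((items.foldl aPass1Step (g, used)).1,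
           items.foldl aPass2Step u,
           (items.foldl aPass1Step (g, used)).2) := by
  intro items
  induction items with
  | nil => intro g u used; simp
  | cons item rest ih =>
    intro g u used
    simp only [List.foldl_cons]
    have hb : bStep (g, u, used) item =
        ((aPass1Step (g, used) item).1, aPass2Step u item, (aPass1Step (g, used) item).2) := by
      simp only [bStep, aPass1Step, aPass2Step]
      rw [bScan_eq]
      cases h : aScan used (PySem.Str.lower item) pvEnumGroups with
      | some i =>
        have hany := aScan_some_any (PySem.Str.lower item) pvEnumGroups used i h
        simp [hany, aNoGroup, ← any_enum]
      | none =>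
        cases hany : pvEnumGroups.any (fun p => pvMatches p.2 (PySem.Str.lower item)) with
        | true => simp [hany, aNoGroup, ← any_enum]
        | false => simp [hany, aNoGroup, ← any_enum]
    rw [hb, ih]

theorem group_similar_items_spec : Claim_equal_group_similar_items := by
  intro items _
  unfold Spec_group_similar_items
  cases items with
  | nil => rfl
  | cons x xs =>
    have h2 : ∀ (l acc : List String),
        l.foldl aPass2Step acc = acc ++ l.foldl aPass2Step [] := by
      intro l acc
      show List.foldl (fun acc x => if aNoGroup x = true then acc ++ [pvCapWords x] else acc) acc l
            = acc ++ List.foldl (fun acc x => if aNoGroup x = true then acc ++ [pvCapWords x] else acc) [] l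
      rw [PySem.List.foldl_append_if, PySem.List.foldl_append_if]
      simp
    simp only [group_similar_items, group_similar_items_alt, List.isEmpty_cons,
      Bool.false_eq_true, if_false]
    rw [loop_eq]
    dsimp only
    rw [h2 (x :: xs)]
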